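-- pv_equiv track=rewrite | github.com/jeffbrianho/python_110 | py119_written_practice/work_space.py | process_with_custom_rules
-- ===== SOURCE A (Python) =====
-- def process_with_custom_rules(numbers):
--     INDICES = {0, 1, 5, 6}
--
--     def is_prime(num):
--         if num < 2:
--             return False
--         else:
--             return all([num % div != 0 for div in range(2, num)])
--
--     return [num for indx, num in enumerate(numbers)
--             if is_prime(num)
--             if indx not in INDICES
--             ]
-- ===== SOURCE B (Python) =====
-- def process_with_custom_rules(numbers):
--     def is_prime(num):
--         if num < 2:
--             return False
--         d = 2
--         while d * d <= num:
--             if num % d == 0: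
--                 return False
--             d += 1
--         return True
--
--     return [n for n in numbers[2:5] + numbers[7:] if is_prime(n)]
-- ===== Notes on version B (the rewrite author's own statement) =====
-- stated objective: faster
-- what changed: B replaces A's O(m) trial division over range(2,num) by a sqrt-bounded trial-division loop (d*d<=num), and replaces the enumerate-plus-index-set filter by plain slicing numbers[2:5]+numbers[7:].
import Mathlib
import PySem

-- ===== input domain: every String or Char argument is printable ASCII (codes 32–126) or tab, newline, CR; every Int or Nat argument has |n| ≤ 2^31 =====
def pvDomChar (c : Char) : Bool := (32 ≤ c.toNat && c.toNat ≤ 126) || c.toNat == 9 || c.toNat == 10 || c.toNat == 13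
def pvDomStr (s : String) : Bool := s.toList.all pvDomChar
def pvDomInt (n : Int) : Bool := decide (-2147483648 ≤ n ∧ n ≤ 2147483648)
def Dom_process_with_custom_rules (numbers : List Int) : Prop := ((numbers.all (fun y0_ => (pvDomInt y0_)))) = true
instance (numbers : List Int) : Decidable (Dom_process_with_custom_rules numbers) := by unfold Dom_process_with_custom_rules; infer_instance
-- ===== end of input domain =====

-- B: sqrt-bounded trial division instead of range(2,num), and slicing numbers[2:5]+numbers[7:] instead of enumerate with an index set (faster).


-- ===== PORT A =====
-- INDICES = {0, 1, 5, 6}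
def pvIndicesA : List Int := PySem.Set.ofList [0, 1, 5, 6]

-- is_prime: all([num % div != 0 for div in range(2, num)])
def pvIsPrimeA (num : Int) : Bool :=
  if num < 2 then false
  else (PySem.List.pyRange 2 num 1).all (fun div => !(PySem.Int.mod num div == 0))

def process_with_custom_rules (numbers : List Int) : List Int :=
  ((PySem.List.enumerate numbers).filter
      (fun p => pvIsPrimeA p.2 && !(decide (p.1 ∈ pvIndicesA)))).map Prod.snd

-- ===== PORT B =====
-- while d * d <= num: if num % d == 0: return False; d += 1
def pvTrialLoop (num d : Int) : Bool :=
  if _h : d * d ≤ num then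
    if PySem.Int.mod num d == 0 then false else pvTrialLoop num (d + 1)
  else true
termination_by (num + 1 - d).toNat
decreasing_by
  have hd : d ≤ num := by
    by_cases h0 : d ≤ 0
    · nlinarith [mul_self_nonneg d]
    · nlinarith
  omega

def pvIsPrimeB (num : Int) : Bool :=
  if num < 2 then false else pvTrialLoop num 2

def process_with_custom_rules_alt (numbers : List Int) : List Int :=
  (PySem.List.slice numbers (some 2) (some 5) ++ PySem.List.slice numbers (some 7) none).filter pvIsPrimeB

-- ===== PRECONDITION & SPEC =====
def Spec_process_with_custom_rules (numbers : List Int) (out : List Int) : Prop := out = process_with_custom_rules_alt numbers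
instance (numbers : List Int) (out : List Int) : Decidable (Spec_process_with_custom_rules numbers out) := by unfold Spec_process_with_custom_rules; infer_instance

-- ===== CLAIM (what is proved, stated in full; the proofs are below) =====
def Claim_equal_process_with_custom_rules : Prop := ∀ (numbers : List Int), Dom_process_with_custom_rules numbers → Spec_process_with_custom_rules numbers (process_with_custom_rules numbers)

-- ===== LEMMAS AND PROOFS =====

-- A's trial division over [2, num): no divisor below num
theorem pvIsPrimeA_iff (num : Int) (h : ¬ num < 2) :
    pvIsPrimeA num = true ↔ ∀ k : Int, 2 ≤ k → k < num → ¬ k ∣ num := by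
  simp [pvIsPrimeA, h, List.all_eq_true, PySem.List.mem_pyRange_one,
    PySem.Int.mod_eq_zero_iff_dvd]

-- B's loop: no divisor d ≤ k with k*k ≤ num
theorem pvTrialLoop_iff (num : Int) :
    ∀ n (d : Int), (num + 1 - d).toNat = n → 1 ≤ d →
      (pvTrialLoop num d = true ↔ ∀ k : Int, d ≤ k → k * k ≤ num → ¬ k ∣ num) := by
  intro n
  induction n using Nat.strong_induction_on with
  | _ n ih =>
    intro d hn hd
    rw [pvTrialLoop]
    split_ifs with h1 h2
    · -- d*d ≤ num and d ∣ num: loop returns false, RHS false via k := d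
      rw [beq_iff_eq, PySem.Int.mod_eq_zero_iff_dvd] at h2
      constructor
      · intro hc; exact absurd hc (by simp)
      · intro hall; exact absurd h2 (hall d le_rfl h1)
    · -- d*d ≤ num, d ∤ num: recurse
      have hdn : d ≤ num := by nlinarith
      have hrec := ih (num + 1 - (d + 1)).toNat (by omega) (d + 1) rfl (by omega)
      rw [hrec]
      rw [beq_iff_eq, PySem.Int.mod_eq_zero_iff_dvd] at h2
      constructor
      · intro hall k hk hkk hdvd
        rcases eq_or_lt_of_le hk with rfl | hlt
        · exact h2 hdvd
        · exact hall k (by omega) hkk hdvd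
      · intro hall k hk hkk hdvd
        exact hall k (by omega) hkk hdvd
    · -- d*d > num: vacuous since k ≥ d ≥ 1 gives k*k ≥ d*d
      constructor
      · intro _ k hk hkk hdvd
        nlinarith
      · intro _; rfl

-- the sqrt bound is enough: any proper divisor yields one with square ≤ num
theorem pvDiv_iff (num : Int) (h2 : 2 ≤ num) :
    (∀ k : Int, 2 ≤ k → k < num → ¬ k ∣ num) ↔
    (∀ k : Int, 2 ≤ k → k * k ≤ num → ¬ k ∣ num) := by
  constructor
  · intro hall k hk hkk hdvd
    exact hall k hk (by nlinarith) hdvd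
  · intro hall k hk hklt hdvd
    obtain ⟨c, hc⟩ := hdvd
    have hkpos : 0 < k := by omega
    have hcpos : 0 < c := by nlinarith
    have hc2 : 2 ≤ c := by
      by_contra hcon
      have hc1 : c = 1 := by omega
      rw [hc1, mul_one] at hc
      omega
    by_cases hle : k * k ≤ num
    · exact hall k hk hle ⟨c, hc⟩
    · rw [not_le] at hle
      have hck : c < k := by nlinarith
      have : c * c ≤ num := by nlinarith
      exact hall c hc2 this ⟨k, by rw [hc, mul_comm]⟩

-- the two primality tests agree
theorem pvIsPrime_eq (num : Int) : pvIsPrimeA num = pvIsPrimeB num := by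
  by_cases h : num < 2
  · simp [pvIsPrimeA, pvIsPrimeB, h]
  · have hA := pvIsPrimeA_iff num h
    have hB := pvTrialLoop_iff num (num + 1 - 2).toNat 2 rfl (by omega)
    have h2 : 2 ≤ num := by omega
    rw [Bool.eq_iff_iff, hA]
    simp only [pvIsPrimeB, if_neg h]
    rw [hB, pvDiv_iff num h2]

-- proof-side helper: the elements at indices outside {0,1,5,6}
def pvKeepIdx (t : List Int) (s : Int) : List Int :=
  match t with
  | [] => []
  | x :: xs => if s ∈ pvIndicesA then pvKeepIdx xs (s + 1) else x :: pvKeepIdx xs (s + 1)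

theorem pvKeepIdx_high : ∀ (t : List Int) (s : Int), 7 ≤ s → pvKeepIdx t s = t := by
  intro t
  induction t with
  | nil => intro s _; rfl
  | cons x xs ih =>
    intro s hs
    have hm : ¬ s ∈ pvIndicesA := by
      simp [pvIndicesA, PySem.Set.ofList]
      omega
    simp [pvKeepIdx, hm, ih (s + 1) (by omega)]

theorem pvKeepIdx_high7 (t : List Int) : pvKeepIdx t 7 = t := pvKeepIdx_high t 7 (by omega)

-- the enumerate comprehension filters q over the index-kept elements
theorem pvFilterEnum (q : Int → Bool) :
    ∀ (t : List Int) (s : Int),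
      ((PySem.List.enumerate t s).filter
          (fun p => q p.2 && !(decide (p.1 ∈ pvIndicesA)))).map Prod.snd
        = (pvKeepIdx t s).filter q := by
  intro t
  induction t with
  | nil => intro s; rfl
  | cons x xs ih =>
    intro s
    rw [PySem.List.enumerate_cons]
    by_cases hm : s ∈ pvIndicesA
    · simp [hm, pvKeepIdx, ih (s + 1)]
    · by_cases hq : q x = true
      · simp [hm, hq, pvKeepIdx, ih (s + 1)]
      · simp [hm, hq, pvKeepIdx, ih (s + 1)]

-- index-kept elements are exactly positions 2,3,4 and ≥ 7
theorem pvKeep0 (numbers : List Int) :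
    pvKeepIdx numbers 0 = (numbers.drop 2).take 3 ++ numbers.drop 7 := by
  rcases numbers with _ | ⟨a, _ | ⟨b, _ | ⟨c, _ | ⟨d, _ | ⟨e, _ | ⟨f, _ | ⟨g, t⟩⟩⟩⟩⟩⟩⟩ <;>
    norm_num [pvKeepIdx, pvKeepIdx_high7, pvIndicesA, PySem.Set.ofList]

-- ===== VERDICT (by name: the statement is the Claim_ definition above) =====
theorem process_with_custom_rules_spec : Claim_equal_process_with_custom_rules := by
  intro numbers _
  unfold Spec_process_with_custom_rules process_with_custom_rules process_with_custom_rules_alt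
  have hsl1 : PySem.List.slice numbers (some 2) (some 5) = (numbers.drop 2).take 3 :=
    PySem.List.slice_toNat numbers (by norm_num) (by norm_num)
  have hsl2 : PySem.List.slice numbers (some 7) none = numbers.drop 7 :=
    PySem.List.slice_from numbers (by norm_num)
  rw [hsl1, hsl2]
  have hq : (fun p : Int × Int => pvIsPrimeA p.2 && !(decide (p.1 ∈ pvIndicesA)))
          = (fun p : Int × Int => pvIsPrimeB p.2 && !(decide (p.1 ∈ pvIndicesA))) := by
    funext p; rw [pvIsPrime_eq]
  rw [hq, pvFilterEnum pvIsPrimeB numbers 0, pvKeep0]
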